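-- pv_equiv track=rewrite | github.com/MariaDanB-Sistem-Basis-Data/Query-Optimizer | helper/helper.py | _split_by_keyword
-- ===== SOURCE A (Python) =====
-- def _split_by_keyword(text, keyword):
--     parts = []
--     current = ""
--     i = 0
--
--     while i < len(text):
--         if text[i:i+len(keyword)].upper() == keyword.upper():
--             parts.append(current.strip())
--             current = ""
--             i += len(keyword)
--         else:
--             current += text[i]
--             i += 1
--
--     if current.strip():
--         parts.append(current.strip())
--
--     return parts if len(parts) > 1 else [text]
-- ===== SOURCE B (Python) =====
-- def _split_by_keyword(text, keyword):
--     up_text = text.upper()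
--     up_kw = keyword.upper()
--     segs = []
--     start = 0
--     pos = up_text.find(up_kw)
--     while pos != -1:
--         segs.append(text[start:pos].strip())
--         start = pos + len(keyword)
--         pos = up_text.find(up_kw, start)
--     last = text[start:].strip()
--     if last:
--         segs.append(last)
--     return segs if len(segs) > 1 else [text]
-- ===== Notes on version B (the rewrite author's own statement) =====
-- stated objective: faster
-- what changed: A scans the text character by character in Python, accumulating the current segment one char at a time and re-uppercasing a keyword-length slice (and the keyword) at every position; B uppercases text and keyword once and jumps from match to match with str.find, slicing each segment out of the original text in one piece.
-- outside the precondition, e.g. on _split_by_keyword('', ''): A returns [''], B does not finish within the time limit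
import Mathlib
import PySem

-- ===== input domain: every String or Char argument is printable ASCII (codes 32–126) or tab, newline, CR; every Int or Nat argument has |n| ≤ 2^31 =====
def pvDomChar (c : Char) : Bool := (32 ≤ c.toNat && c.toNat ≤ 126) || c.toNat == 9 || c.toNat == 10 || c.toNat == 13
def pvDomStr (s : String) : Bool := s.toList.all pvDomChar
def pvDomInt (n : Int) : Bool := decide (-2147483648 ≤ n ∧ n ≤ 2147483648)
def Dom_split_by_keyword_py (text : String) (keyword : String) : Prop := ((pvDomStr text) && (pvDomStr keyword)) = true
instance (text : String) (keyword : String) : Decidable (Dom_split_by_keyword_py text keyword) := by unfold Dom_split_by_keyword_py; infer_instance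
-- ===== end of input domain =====

-- B replaces A's per-character scan-and-accumulate loop by a jump-by-jump scan of a once-uppercased
-- text using str.find, slicing each segment out of the original text (objective: alternative/idiomatic).

-- ===== PORT A =====
-- A's while loop, one fuel unit per iteration; when keyword ≠ "" the index advances by ≥ 1 each
-- iteration, so fuel = |text| + 1 never runs out on inputs admitted by Pre_; the fuel-0 case
-- returns the state exactly as the loop-exit branch does.
def pvLoopA (t k : List Char) : Nat → Nat → List Char → List (List Char) → List (List Char) × List Char
  | 0, _, cur, parts => (parts, cur)
  | fuel+1, i, cur, parts =>
    if i < t.length then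
      if PySem.Chars.upper ((t.drop i).take k.length) = PySem.Chars.upper k then
        pvLoopA t k fuel (i + k.length) [] (parts ++ [PySem.Chars.strip cur])
      else
        pvLoopA t k fuel (i + 1) (cur ++ [t.getD i ' ']) parts
    else (parts, cur)

def split_by_keyword_py (text : String) (keyword : String) : List String :=
  let t := text.toList
  let k := keyword.toList
  let r := pvLoopA t k (t.length + 1) 0 [] []
  let parts := if PySem.Chars.strip r.2 ≠ [] then r.1 ++ [PySem.Chars.strip r.2] else r.1
  if parts.length > 1 then parts.map (fun p => String.ofList p) else [text]

-- ===== PORT B =====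
-- B's while loop: `pos = up_text.find(up_kw, start)` is computed at the top of each iteration
-- (B's Python computes the first `find` before the loop and the next at its bottom — same values).
-- `start` is Python's int, always a Nat here since B only ever adds to it; one fuel unit per
-- iteration, and fuel = |text| + 1 never runs out on inputs admitted by Pre_.
def pvLoopB (t upT upK : List Char) (klen : Nat) : Nat → Nat → List (List Char) → List (List Char) × Nat
  | 0, start, segs => (segs, start)
  | fuel+1, start, segs =>
    let pos := PySem.Chars.findFrom upT upK (start : Int)
    if pos = -1 then (segs, start)
    else pvLoopB t upT upK klen fuel (pos.toNat + klen)
           (segs ++ [PySem.Chars.strip (PySem.List.slice t (some (start : Int)) (some pos))])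

def split_by_keyword_py_alt (text : String) (keyword : String) : List String :=
  let t := text.toList
  let upT := PySem.Chars.upper t
  let upK := PySem.Chars.upper keyword.toList
  let r := pvLoopB t upT upK keyword.toList.length (t.length + 1) 0 []
  let last := PySem.Chars.strip (PySem.List.slice t (some ((r.2 : Nat) : Int)) none)
  let segs := if last ≠ [] then r.1 ++ [last] else r.1
  if segs.length > 1 then segs.map (fun p => String.ofList p) else [text]

-- ===== PRECONDITION & SPEC =====
-- Pre_ excludes keyword = "": there A's loop never advances i, so A diverges on every non-empty
-- text (and B's find('') loop diverges likewise); the single input ("", "") on which A still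
-- returns [""] is excluded with it — B diverges there too.
def Pre_split_by_keyword_py (text : String) (keyword : String) : Prop := keyword ≠ ""
instance (text : String) (keyword : String) : Decidable (Pre_split_by_keyword_py text keyword) := by unfold Pre_split_by_keyword_py; infer_instance

def pvWitness_split_by_keyword_py : String × String := ("a AND b and c", "and")

def Spec_split_by_keyword_py (text : String) (keyword : String) (out : List String) : Prop := out = split_by_keyword_py_alt text keyword
instance (text : String) (keyword : String) (out : List String) : Decidable (Spec_split_by_keyword_py text keyword out) := by unfold Spec_split_by_keyword_py; infer_instance

-- ===== CLAIM (what is proved, stated in full; the proofs are below) =====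
def Claim_equal_split_by_keyword_py : Prop := ∀ (text : String) (keyword : String), Dom_split_by_keyword_py text keyword → Pre_split_by_keyword_py text keyword → Spec_split_by_keyword_py text keyword (split_by_keyword_py text keyword)

-- ===== LEMMAS AND PROOFS =====

theorem pvLoopA_exit (t k : List Char) (f i : Nat) (cur : List Char) (parts : List (List Char))
    (h : t.length ≤ i) : pvLoopA t k f i cur parts = (parts, cur) := by
  cases f with
  | zero => rfl
  | succ n => simp [pvLoopA, Nat.not_lt.mpr h]

theorem pvLoopA_fuel (t k : List Char) (hk : k ≠ []) :
    ∀ f1 f2 i cur parts, t.length - i ≤ f1 → t.length - i ≤ f2 →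
      pvLoopA t k f1 i cur parts = pvLoopA t k f2 i cur parts := by
  intro f1
  induction f1 with
  | zero =>
    intro f2 i cur parts h1 h2
    have hi : t.length ≤ i := by omega
    rw [pvLoopA_exit t k 0 i cur parts hi, pvLoopA_exit t k f2 i cur parts hi]
  | succ n ih =>
    intro f2 i cur parts h1 h2
    by_cases hi : i < t.length
    · have hk1 : 1 ≤ k.length := List.length_pos_iff.mpr hk
      obtain ⟨m, rfl⟩ : ∃ m, f2 = m + 1 := ⟨f2 - 1, by omega⟩
      by_cases hm : PySem.Chars.upper ((t.drop i).take k.length) = PySem.Chars.upper k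
      · simp only [pvLoopA, if_pos hi, if_pos hm]
        exact ih m (i + k.length) [] (parts ++ [PySem.Chars.strip cur]) (by omega) (by omega)
      · simp only [pvLoopA, if_pos hi, if_neg hm]
        exact ih m (i + 1) (cur ++ [t.getD i ' ']) parts (by omega) (by omega)
    · rw [pvLoopA_exit t k _ i cur parts (by omega), pvLoopA_exit t k f2 i cur parts (by omega)]

theorem pvLoopA_skip (t k : List Char) (hk : k ≠ []) :
    ∀ n i cur parts f1 f2, i + n ≤ t.length →
      (∀ j, i ≤ j → j < i + n → ¬ (PySem.Chars.upper ((t.drop j).take k.length) = PySem.Chars.upper k)) →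
      t.length - i ≤ f1 → t.length - (i + n) ≤ f2 →
      pvLoopA t k f1 i cur parts = pvLoopA t k f2 (i + n) (cur ++ (t.drop i).take n) parts := by
  intro n
  induction n with
  | zero =>
    intro i cur parts f1 f2 hn hnm h1 h2
    simpa using pvLoopA_fuel t k hk f1 f2 i cur parts h1 (by omega)
  | succ n ih =>
    intro i cur parts f1 f2 hn hnm h1 h2
    have hi : i < t.length := by omega
    obtain ⟨m, rfl⟩ : ∃ m, f1 = m + 1 := ⟨f1 - 1, by omega⟩
    have hnomatch := hnm i le_rfl (by omega)
    simp only [pvLoopA, if_pos hi, if_neg hnomatch]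
    have hstep := ih (i + 1) (cur ++ [t.getD i ' ']) parts m f2 (by omega)
      (fun j hj1 hj2 => hnm j (by omega) (by omega)) (by omega) (by omega)
    rw [hstep]
    have hdrop : t.drop i = t[i] :: t.drop (i + 1) := List.drop_eq_getElem_cons hi
    have hgetD : t.getD i ' ' = t[i] := List.getD_eq_getElem t ' ' hi
    rw [show i + 1 + n = i + (n + 1) by omega] at *
    rw [hdrop, hgetD, List.take_succ_cons]
    simp

theorem pvMatch_iff (t k : List Char) (i : Nat) :
    (PySem.Chars.upper ((t.drop i).take k.length) = PySem.Chars.upper k) ↔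
      PySem.Chars.upper k <+: (PySem.Chars.upper t).drop i := by
  have hu : PySem.Chars.upper ((t.drop i).take k.length)
      = ((PySem.Chars.upper t).drop i).take ((PySem.Chars.upper k).length) := by
    simp [PySem.Chars.upper, List.map_take, List.map_drop]
  rw [List.prefix_iff_eq_take, hu, eq_comm]

theorem pvMain (t k : List Char) (hk : k ≠ []) :
    ∀ f2 start parts f1, start ≤ t.length → t.length - start ≤ f1 → t.length - start ≤ f2 →
      pvLoopA t k f1 start [] parts =
        ((pvLoopB t (PySem.Chars.upper t) (PySem.Chars.upper k) k.length f2 start parts).1,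
         t.drop (pvLoopB t (PySem.Chars.upper t) (PySem.Chars.upper k) k.length f2 start parts).2) := by
  have hlenU : (PySem.Chars.upper t).length = t.length := by simp [PySem.Chars.upper]
  have hlenK : (PySem.Chars.upper k).length = k.length := by simp [PySem.Chars.upper]
  have hk1 : 1 ≤ k.length := List.length_pos_iff.mpr hk
  intro f2
  induction f2 with
  | zero =>
    intro start parts f1 hs h1 h2
    have hs' : start = t.length := by omega
    simp only [pvLoopB]
    rw [pvLoopA_exit t k f1 start [] parts (by omega), hs']
    simp
  | succ m ih =>
    intro start parts f1 hs h1 h2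
    have hstartU : start ≤ (PySem.Chars.upper t).length := by omega
    by_cases hpos : PySem.Chars.findFrom (PySem.Chars.upper t) (PySem.Chars.upper k) (start : Int) = -1
    · -- no further match: A walks to the end accumulating t[start:]
      simp only [pvLoopB, hpos, reduceIte]
      have hninf : ¬ PySem.Chars.upper k <:+: (PySem.Chars.upper t).drop start :=
        (PySem.Chars.findFrom_natCast_eq_neg_one_iff _ _ start hstartU).mp hpos
      have hnm : ∀ j, start ≤ j → j < start + (t.length - start) →
          ¬ (PySem.Chars.upper ((t.drop j).take k.length) = PySem.Chars.upper k) := by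
        intro j hj1 hj2 hm
        have hpre := (pvMatch_iff t k j).mp hm
        have hdd : PySem.Chars.upper k <+: ((PySem.Chars.upper t).drop start).drop (j - start) := by
          rwa [List.drop_drop, show start + (j - start) = j by omega]
        exact hninf ((PySem.Chars.isIn_iff_infix _ _).mp
          ((PySem.Chars.exists_prefix_drop_iff_isIn _ _).mp ⟨j - start, hdd⟩))
      have hskip := pvLoopA_skip t k hk (t.length - start) start [] parts f1 0
        (by omega) hnm h1 (by omega)
      rw [hskip, pvLoopA_exit t k 0 _ _ _ (by omega)]
      have htake : (t.drop start).take (t.length - start) = t.drop start := by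
        apply List.take_of_length_le; simp
      simp [htake]
    · -- match at pos: both append the stripped segment and continue at pos + len(keyword)
      obtain ⟨hle, hpre, hmin⟩ := PySem.Chars.findFrom_natCast_spec (PySem.Chars.upper t)
        (PySem.Chars.upper k) start hstartU hpos
      set p := PySem.Chars.findFrom (PySem.Chars.upper t) (PySem.Chars.upper k) (start : Int) with hp
      have hp0 : 0 ≤ p := le_trans (by exact_mod_cast Int.natCast_nonneg start) hle
      have hpn : (p.toNat : Int) = p := Int.toNat_of_nonneg hp0
      have hsp : start ≤ p.toNat := by omega
      have hplen : p.toNat + k.length ≤ t.length := by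
        have := hpre.length_le
        rw [List.length_drop, hlenU, hlenK] at this
        omega
      have hmatchp : PySem.Chars.upper ((t.drop p.toNat).take k.length) = PySem.Chars.upper k :=
        (pvMatch_iff t k p.toNat).mpr hpre
      have hnm : ∀ j, start ≤ j → j < start + (p.toNat - start) →
          ¬ (PySem.Chars.upper ((t.drop j).take k.length) = PySem.Chars.upper k) := by
        intro j hj1 hj2 hm
        exact hmin j hj1 (by omega) ((pvMatch_iff t k j).mp hm)
      have hAskip := pvLoopA_skip t k hk (p.toNat - start) start [] parts f1 (t.length - p.toNat)
        (by omega) hnm h1 (by omega)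
      rw [show start + (p.toNat - start) = p.toNat by omega] at hAskip
      obtain ⟨mm, hmm⟩ : ∃ mm, t.length - p.toNat = mm + 1 := ⟨t.length - p.toNat - 1, by omega⟩
      rw [hAskip, hmm]
      have hip : p.toNat < t.length := by omega
      simp only [pvLoopA, if_pos hip, if_pos hmatchp, List.nil_append]
      simp only [pvLoopB]
      rw [← hp, if_neg hpos]
      have hslice : PySem.List.slice t (some (start : Int)) (some p)
          = (t.drop start).take (p.toNat - start) := by
        rw [← hpn, PySem.List.slice_natCast]
        simp
        omega
      rw [← hslice]
      exact ih (p.toNat + k.length)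
        (parts ++ [PySem.Chars.strip (PySem.List.slice t (some (start : Int)) (some p))]) mm
        (by omega) (by omega) (by omega)

-- ===== VERDICT (by name: the statement is the Claim_ definition above) =====
theorem split_by_keyword_py_spec : Claim_equal_split_by_keyword_py := by
  intro text keyword _ hpre
  unfold Spec_split_by_keyword_py
  have hk : keyword.toList ≠ [] := by
    intro h
    apply hpre
    have := congrArg String.ofList h
    simpa using this
  have hmain := pvMain text.toList keyword.toList hk (text.toList.length + 1) 0 []
    (text.toList.length + 1) (by omega) (by omega) (by omega)
  simp only [split_by_keyword_py, split_by_keyword_py_alt]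
  rw [hmain, PySem.List.slice_from_natCast]
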